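-- pv_equiv track=rewrite | github.com/thisiseddy-ab/ComfyUI-Edins-Ultimate-Pack | EUP/services/tiling.py | generatePosforOVPStrategy
-- ===== SOURCE A (Python) =====
-- def generatePosforOVPStrategy(latent_width: int, latent_height: int, tile_width: int, tile_height: int, overlap: int):
--     """
--     Generate tile positions with overlap while ensuring full image coverage.
--
--     :param latent_width: Total width of the latent image.
--     :param latent_height: Total height of the latent image.
--     :param tile_width: Base width of each tile (latent space).
--     :param tile_height: Base height of each tile (latent space).
--     :param overlap: Overlap in latent space (NOT a percentage).
--     :return: List of tile positions with structure [[(x, y, w, h), ...], ...].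
--     """
--     # Compute effective stride
--     stride_x = max(1, tile_width - overlap)
--     stride_y = max(1, tile_height - overlap)
--
--     # Calculate number of tiles, ensuring at least one tile
--     num_tiles_x = max(1, (latent_width - overlap) // stride_x)
--     num_tiles_y = max(1, (latent_height - overlap) // stride_y)
--
--     tile_positions = []
--
--     for j in range(num_tiles_y + 1):  # +1 ensures full coverage at the bottom
--         row_positions = []
--         for i in range(num_tiles_x + 1):  # +1 ensures full coverage at the right
--             x = i * stride_x
--             y = j * stride_y
--
--             # Ensure last tile reaches the boundary
--             if x + tile_width > latent_width:
--                 x = latent_width - tile_width  # Align last column with the right edge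
--             if y + tile_height > latent_height:
--                 y = latent_height - tile_height  # Align last row with the bottom edge
--
--             row_positions.append((x, y, tile_width, tile_height))
--
--         tile_positions.append(row_positions)
--
--     return [tile_positions]
-- ===== SOURCE B (Python) =====
-- def generatePosforOVPStrategy(latent_width: int, latent_height: int, tile_width: int, tile_height: int, overlap: int):
--     stride_x = max(1, tile_width - overlap)
--     stride_y = max(1, tile_height - overlap)
--
--     num_tiles_x = max(1, (latent_width - overlap) // stride_x)
--     num_tiles_y = max(1, (latent_height - overlap) // stride_y)
--
--     # Closed-form split point: indices i with i*stride_x <= latent_width - tile_width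
--     # are unclamped; everything after is clamped to the right/bottom edge.
--     kx = min(num_tiles_x + 1, max(0, (latent_width - tile_width) // stride_x + 1))
--     ky = min(num_tiles_y + 1, max(0, (latent_height - tile_height) // stride_y + 1))
--
--     xs = list(range(0, kx * stride_x, stride_x)) + [latent_width - tile_width] * (num_tiles_x + 1 - kx)
--     ys = list(range(0, ky * stride_y, stride_y)) + [latent_height - tile_height] * (num_tiles_y + 1 - ky)
--
--     grid = [[(x, y, tile_width, tile_height) for x in xs] for y in ys]
--     return [grid]
-- ===== Notes on version B (the rewrite author's own statement) =====
-- stated objective: alternative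
-- what changed: Instead of testing and applying the edge clamp in every grid cell, B computes each axis's clamp split point in closed form by floor division, builds the unclamped coordinates as an arithmetic range and the clamped tail by list replication, and combines the two axis lists into the grid.
import Mathlib
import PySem

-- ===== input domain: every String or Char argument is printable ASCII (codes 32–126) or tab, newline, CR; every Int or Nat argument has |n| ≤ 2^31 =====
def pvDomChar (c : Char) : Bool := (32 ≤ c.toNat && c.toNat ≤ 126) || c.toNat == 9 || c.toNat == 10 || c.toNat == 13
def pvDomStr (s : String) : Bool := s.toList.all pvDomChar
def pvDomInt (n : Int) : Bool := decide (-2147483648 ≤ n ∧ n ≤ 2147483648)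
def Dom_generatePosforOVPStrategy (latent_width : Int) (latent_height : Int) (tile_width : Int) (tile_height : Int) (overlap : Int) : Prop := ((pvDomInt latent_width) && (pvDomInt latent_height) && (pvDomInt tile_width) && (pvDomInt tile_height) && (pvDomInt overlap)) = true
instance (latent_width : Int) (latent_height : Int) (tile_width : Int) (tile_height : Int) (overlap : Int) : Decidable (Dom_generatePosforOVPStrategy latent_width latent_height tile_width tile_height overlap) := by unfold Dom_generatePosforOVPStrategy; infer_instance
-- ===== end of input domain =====

-- B removes the per-cell clamp test entirely: it computes the clamp split point of each axis
-- in closed form, builds the unclamped prefix as an arithmetic range and the clamped suffix by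
-- replication, then combines the two axis lists into the grid.

-- ===== PORT A =====
def generatePosforOVPStrategy (latent_width : Int) (latent_height : Int) (tile_width : Int) (tile_height : Int) (overlap : Int) : List (List (List (Int × Int × Int × Int))) :=
  let stride_x := max 1 (tile_width - overlap)
  let stride_y := max 1 (tile_height - overlap)
  let num_tiles_x := max 1 (PySem.Int.floordiv (latent_width - overlap) stride_x)
  let num_tiles_y := max 1 (PySem.Int.floordiv (latent_height - overlap) stride_y)
  let tile_positions :=
    (PySem.List.pyRange 0 (num_tiles_y + 1) 1).foldl (fun acc j =>
      let row_positions :=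
        (PySem.List.pyRange 0 (num_tiles_x + 1) 1).foldl (fun racc i =>
          let x := i * stride_x
          let y := j * stride_y
          let x := if x + tile_width > latent_width then latent_width - tile_width else x
          let y := if y + tile_height > latent_height then latent_height - tile_height else y
          racc ++ [(x, y, tile_width, tile_height)]) []
      acc ++ [row_positions]) []
  [tile_positions]

-- ===== PORT B =====
def generatePosforOVPStrategy_alt (latent_width : Int) (latent_height : Int) (tile_width : Int) (tile_height : Int) (overlap : Int) : List (List (List (Int × Int × Int × Int))) :=
  let stride_x := max 1 (tile_width - overlap)
  let stride_y := max 1 (tile_height - overlap)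
  let num_tiles_x := max 1 (PySem.Int.floordiv (latent_width - overlap) stride_x)
  let num_tiles_y := max 1 (PySem.Int.floordiv (latent_height - overlap) stride_y)
  let kx := min (num_tiles_x + 1) (max 0 (PySem.Int.floordiv (latent_width - tile_width) stride_x + 1))
  let ky := min (num_tiles_y + 1) (max 0 (PySem.Int.floordiv (latent_height - tile_height) stride_y + 1))
  let xs := PySem.List.pyRange 0 (kx * stride_x) stride_x ++ List.replicate (num_tiles_x + 1 - kx).toNat (latent_width - tile_width)
  let ys := PySem.List.pyRange 0 (ky * stride_y) stride_y ++ List.replicate (num_tiles_y + 1 - ky).toNat (latent_height - tile_height)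
  let grid := ys.map (fun y => xs.map (fun x => (x, y, tile_width, tile_height)))
  [grid]

-- ===== PRECONDITION & SPEC =====
def Spec_generatePosforOVPStrategy (latent_width : Int) (latent_height : Int) (tile_width : Int) (tile_height : Int) (overlap : Int) (out : List (List (List (Int × Int × Int × Int)))) : Prop := out = generatePosforOVPStrategy_alt latent_width latent_height tile_width tile_height overlap
instance (latent_width : Int) (latent_height : Int) (tile_width : Int) (tile_height : Int) (overlap : Int) (out : List (List (List (Int × Int × Int × Int)))) : Decidable (Spec_generatePosforOVPStrategy latent_width latent_height tile_width tile_height overlap out) := by unfold Spec_generatePosforOVPStrategy; infer_instance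

-- ===== CLAIM (what is proved, stated in full; the proofs are below) =====
def Claim_equal_generatePosforOVPStrategy : Prop := ∀ (latent_width : Int) (latent_height : Int) (tile_width : Int) (tile_height : Int) (overlap : Int), Dom_generatePosforOVPStrategy latent_width latent_height tile_width tile_height overlap → Spec_generatePosforOVPStrategy latent_width latent_height tile_width tile_height overlap (generatePosforOVPStrategy latent_width latent_height tile_width tile_height overlap)

-- ===== LEMMAS AND PROOFS =====

-- append-accumulator fold equals map
theorem pv_foldl_append_map {α β : Type} (f : α → β) (l : List α) (acc : List β) :
    l.foldl (fun acc a => acc ++ [f a]) acc = acc ++ l.map f := by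
  induction l generalizing acc with
  | nil => simp
  | cons a t ih => simp [List.foldl, ih]

-- one axis: the per-index clamp over range(n+1) equals closed-form prefix ++ replicated clamp
theorem pv_axis (lw tw s n : Int) (hs : 1 ≤ s) (hn : 0 ≤ n) :
    (PySem.List.pyRange 0 (n+1) 1).map (fun i => if i * s + tw > lw then lw - tw else i * s)
    = PySem.List.pyRange 0 ((min (n+1) (max 0 (PySem.Int.floordiv (lw - tw) s + 1))) * s) s
      ++ List.replicate ((n+1) - min (n+1) (max 0 (PySem.Int.floordiv (lw - tw) s + 1))).toNat (lw - tw) := by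
  have hs0 : (0:Int) < s := by omega
  rw [PySem.Int.floordiv_eq_ediv_of_pos hs0]
  set L : Int := lw - tw with hL
  set q : Int := L / s with hq
  set k : Int := min (n+1) (max 0 (q + 1)) with hk
  have hk0 : 0 ≤ k := by simp [hk]; omega
  have hkn : k ≤ n + 1 := by simp [hk]
  have hcnt : (if (0:Int) < k * s then ((k * s - 0 + s - 1) / s).toNat else 0) = k.toNat := by
    by_cases hkpos : 0 < k
    · have hlt : (0:Int) < k * s := by positivity
      rw [if_pos hlt]
      have heq : (k * s - 0 + s - 1) / s = k + (s - 1) / s := by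
        have h2 := Int.add_mul_ediv_right (s - 1) k (by omega : s ≠ 0)
        rw [show k * s - 0 + s - 1 = s - 1 + k * s by ring, h2, add_comm]
      have h0 : (s - 1) / s = 0 := Int.ediv_eq_zero_of_lt (by omega) (by omega)
      rw [heq, h0, add_zero]
    · rw [if_neg (by nlinarith : ¬ (0:Int) < k * s)]
      omega
  rw [PySem.List.pyRange_of_pos 0 (k * s) hs0, hcnt, PySem.List.pyRange_one]
  apply List.ext_getElem
  · simp [List.length_replicate]
    omega
  · intro m hm1 hm2
    simp only [List.length_map, List.length_range] at hm1
    have hmlt : (m:Int) < n + 1 := by omega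
    have hle : ∀ a : Int, a ≤ q ↔ a * s ≤ L := fun a => Int.le_ediv_iff_mul_le hs0
    simp only [List.getElem_map, List.getElem_range]
    by_cases hcase : m < k.toNat
    · -- unclamped prefix
      have hmq : (m:Int) ≤ q := by
        have hmk : (m:Int) < k := by omega
        simp only [hk] at hmk; omega
      have hnoclamp : ¬ ((0 + (m:Int)) * s + tw > lw) := by
        have := (hle (m:Int)).mp hmq
        simp only [zero_add]
        omega
      rw [List.getElem_append_left (by simpa using hcase), if_neg hnoclamp]
      simp only [List.getElem_map, List.getElem_range]
      ring
    · -- clamped suffix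
      have hmk : k ≤ (m:Int) := by omega
      have hqm : q < (m:Int) := by
        have hklt : k < n + 1 := by omega
        have hkM : k = max 0 (q + 1) := by
          simp only [hk] at hklt ⊢; omega
        omega
      have hclamp : (0 + (m:Int)) * s + tw > lw := by
        have h1 : ¬ ((m:Int) ≤ q) := by omega
        have h2 := (not_iff_not.mpr (hle (m:Int))).mp h1
        simp only [zero_add]
        omega
      rw [List.getElem_append_right (by simpa using hcase), if_pos hclamp, List.getElem_replicate]

-- ===== VERDICT (by name: the statement is the Claim_ definition above) =====
theorem generatePosforOVPStrategy_spec : Claim_equal_generatePosforOVPStrategy := by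
  intro lw lh tw th ov _
  show _ = _
  simp only [generatePosforOVPStrategy, generatePosforOVPStrategy_alt]
  rw [pv_foldl_append_map]
  rw [← pv_axis lw tw (max 1 (tw - ov)) (max 1 (PySem.Int.floordiv (lw - ov) (max 1 (tw - ov)))) (le_max_left _ _) (by positivity)]
  rw [← pv_axis lh th (max 1 (th - ov)) (max 1 (PySem.Int.floordiv (lh - ov) (max 1 (th - ov)))) (le_max_left _ _) (by positivity)]
  simp only [List.nil_append, List.map_map]
  congr 2
  funext j
  rw [pv_foldl_append_map]
  simp
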